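-- pv_equiv track=rewrite | github.com/lasofre/LanDrop | app.py | get_file_emoji
-- ===== SOURCE A (Python) =====
-- def get_file_emoji(name):
--     name = name.lower()
--     if any(name.endswith(e) for e in [".jpg",".jpeg",".png",".gif",".webp",".svg"]): return "🖼️"
--     if name.endswith(".pdf"): return "📕"
--     if any(name.endswith(e) for e in [".mp4",".mov",".avi",".mkv"]): return "🎬"
--     if any(name.endswith(e) for e in [".mp3",".wav",".flac",".ogg"]): return "🎵"
--     if any(name.endswith(e) for e in [".zip",".rar",".7z",".tar",".gz"]): return "📦"
--     if any(name.endswith(e) for e in [".doc",".docx"]): return "📝"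
--     if any(name.endswith(e) for e in [".xls",".xlsx"]): return "📊"
--     if any(name.endswith(e) for e in [".py",".js",".html",".css",".json"]): return "💻"
--     return "📄"
-- ===== SOURCE B (Python) =====
-- _EMOJI = {
--     "jpg": "🖼️", "jpeg": "🖼️", "png": "🖼️", "gif": "🖼️", "webp": "🖼️", "svg": "🖼️",
--     "pdf": "📕",
--     "mp4": "🎬", "mov": "🎬", "avi": "🎬", "mkv": "🎬",
--     "mp3": "🎵", "wav": "🎵", "flac": "🎵", "ogg": "🎵",
--     "zip": "📦", "rar": "📦", "7z": "📦", "tar": "📦", "gz": "📦",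
--     "doc": "📝", "docx": "📝",
--     "xls": "📊", "xlsx": "📊",
--     "py": "💻", "js": "💻", "html": "💻", "css": "💻", "json": "💻",
-- }
--
-- def get_file_emoji(name):
--     parts = name.lower().rsplit(".", 1)
--     if len(parts) == 1:
--         return "📄"
--     return _EMOJI.get(parts[1], "📄")
-- ===== Notes on version B (the rewrite author's own statement) =====
-- stated objective: idiomatic
-- what changed: B replaces A's cascade of any(endswith) scans over eight hard-coded extension lists by extracting the extension once with rsplit with maxsplit 1 on the dot separator and looking it up in a single extension-to-emoji dict.
import Mathlib
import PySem

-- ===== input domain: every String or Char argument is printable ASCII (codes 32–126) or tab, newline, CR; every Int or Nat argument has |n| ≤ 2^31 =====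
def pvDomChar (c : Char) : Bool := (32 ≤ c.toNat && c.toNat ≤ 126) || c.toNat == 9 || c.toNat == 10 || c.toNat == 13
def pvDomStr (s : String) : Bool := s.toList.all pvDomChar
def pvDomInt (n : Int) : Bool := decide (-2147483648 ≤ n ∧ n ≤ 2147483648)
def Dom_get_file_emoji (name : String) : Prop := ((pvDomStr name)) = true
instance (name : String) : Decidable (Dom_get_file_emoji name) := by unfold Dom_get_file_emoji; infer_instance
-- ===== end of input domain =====

-- B replaces A's chain of endswith scans by one extension extraction (rsplit) and one dict lookup; same results, proved equivalent on all inputs.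

-- ===== PORT A =====
def get_file_emoji (name : String) : String :=
  let s := PySem.Str.lower name
  if [".jpg",".jpeg",".png",".gif",".webp",".svg"].any (fun e => PySem.Str.endswith s e) then "🖼️"
  else if PySem.Str.endswith s ".pdf" then "📕"
  else if [".mp4",".mov",".avi",".mkv"].any (fun e => PySem.Str.endswith s e) then "🎬"
  else if [".mp3",".wav",".flac",".ogg"].any (fun e => PySem.Str.endswith s e) then "🎵"
  else if [".zip",".rar",".7z",".tar",".gz"].any (fun e => PySem.Str.endswith s e) then "📦"
  else if [".doc",".docx"].any (fun e => PySem.Str.endswith s e) then "📝"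
  else if [".xls",".xlsx"].any (fun e => PySem.Str.endswith s e) then "📊"
  else if [".py",".js",".html",".css",".json"].any (fun e => PySem.Str.endswith s e) then "💻"
  else "📄"

-- ===== PORT B =====
-- hand port of Source B's name.rsplit(dot, maxsplit 1), specialised to its only use: it returns the part
-- after the LAST '.' (parts[1]) when a '.' occurs, and none when len(parts) == 1; exact.
def rsplitDot1 : List Char → Option (List Char)
  | [] => none
  | c :: rest =>
    match rsplitDot1 rest with
    | some t => some t
    | none => if c = '.' then some rest else none

-- Source B's _EMOJI dict
def emojiTable : PySem.Dict String String := PySem.Dict.ofList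
  [("jpg","🖼️"),("jpeg","🖼️"),("png","🖼️"),("gif","🖼️"),("webp","🖼️"),("svg","🖼️"),
   ("pdf","📕"),
   ("mp4","🎬"),("mov","🎬"),("avi","🎬"),("mkv","🎬"),
   ("mp3","🎵"),("wav","🎵"),("flac","🎵"),("ogg","🎵"),
   ("zip","📦"),("rar","📦"),("7z","📦"),("tar","📦"),("gz","📦"),
   ("doc","📝"),("docx","📝"),
   ("xls","📊"),("xlsx","📊"),
   ("py","💻"),("js","💻"),("html","💻"),("css","💻"),("json","💻")]

def get_file_emoji_alt (name : String) : String :=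
  match rsplitDot1 (PySem.Str.lower name).toList with
  | none => "📄"
  | some t => emojiTable.getD (String.ofList t) "📄"

-- ===== PRECONDITION & SPEC =====
def Spec_get_file_emoji (name : String) (out : String) : Prop := out = get_file_emoji_alt name
instance (name : String) (out : String) : Decidable (Spec_get_file_emoji name out) := by unfold Spec_get_file_emoji; infer_instance

-- ===== CLAIM (what is proved, stated in full; the proofs are below) =====
def Claim_equal_get_file_emoji : Prop := ∀ (name : String), Dom_get_file_emoji name → Spec_get_file_emoji name (get_file_emoji name)

-- ===== LEMMAS AND PROOFS =====

theorem rsplitDot1_eq_none (l : List Char) : rsplitDot1 l = none ↔ '.' ∉ l := by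
  induction l with
  | nil => simp [rsplitDot1]
  | cons c rest ih =>
    cases hr : rsplitDot1 rest with
    | some t =>
      have hmem : '.' ∈ rest := by
        by_contra hn
        have hne := ih.mpr hn
        rw [hne] at hr; cases hr
      simp [rsplitDot1, hr, hmem]
    | none =>
      have hnd : '.' ∉ rest := ih.mp hr
      by_cases hc : c = '.'
      · simp [rsplitDot1, hr, hc]
      · simp [rsplitDot1, hr, hc, hnd]
        intro h; exact hc h.symm

theorem suffix_dot_iff (ext : List Char) (h : '.' ∉ ext) (l : List Char) :
    ('.' :: ext) <:+ l ↔ rsplitDot1 l = some ext := by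
  induction l with
  | nil => simp [rsplitDot1]
  | cons c rest ih =>
    rw [List.suffix_cons_iff]
    cases hr : rsplitDot1 rest with
    | some t =>
      have hmem : '.' ∈ rest := by
        by_contra hn
        have hne := (rsplitDot1_eq_none rest).mpr hn
        rw [hne] at hr; cases hr
      simp only [rsplitDot1, hr]
      constructor
      · rintro (heq | hsuf)
        · injection heq with hc hrest
          rw [← hrest] at hmem
          exact absurd hmem h
        · rw [ih, hr] at hsuf; exact hsuf
      · intro hs; right; rw [ih, hr]; exact hs
    | none =>
      have hnd : '.' ∉ rest := (rsplitDot1_eq_none rest).mp hr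
      simp only [rsplitDot1, hr]
      constructor
      · rintro (heq | hsuf)
        · injection heq with hc hrest
          rw [if_pos hc.symm, hrest]
        · have := ih.mp hsuf
          rw [hr] at this; cases this
      · intro hs
        by_cases hc : c = '.'
        · rw [if_pos hc] at hs
          injection hs with hs'
          left; rw [hc, hs']
        · rw [if_neg hc] at hs; cases hs

theorem endswith_dot (l ext : List Char) (h : '.' ∉ ext) :
    PySem.Chars.endswith l ('.' :: ext) = decide (rsplitDot1 l = some ext) := by
  by_cases hc : rsplitDot1 l = some ext
  · rw [decide_eq_true hc]
    rw [PySem.Chars.endswith_iff]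
    exact (suffix_dot_iff ext h l).mpr hc
  · rw [decide_eq_false hc, ← Bool.not_eq_true, PySem.Chars.endswith_iff]
    exact fun hs => hc ((suffix_dot_iff ext h l).mp hs)

theorem endswith_dot_str (s e : String) (ext : List Char)
    (he : e.toList = '.' :: ext) (h : '.' ∉ ext) :
    PySem.Str.endswith s e = decide (rsplitDot1 s.toList = some ext) := by
  rw [PySem.Str.endswith_eq, he, endswith_dot _ _ h]

theorem beq_mk_false (k : String) (l t : List Char) (hk : k.toList = l) (h : ¬ t = l) :
    (k == String.ofList t) = false := by
  simp only [beq_eq_false_iff_ne, ne_eq]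
  intro hh; exact h (by rw [← hk, hh]; simp)

theorem emojiTable_eq : emojiTable = PySem.Dict.mk
  [("jpg","🖼️"),("jpeg","🖼️"),("png","🖼️"),("gif","🖼️"),("webp","🖼️"),("svg","🖼️"),
   ("pdf","📕"),
   ("mp4","🎬"),("mov","🎬"),("avi","🎬"),("mkv","🎬"),
   ("mp3","🎵"),("wav","🎵"),("flac","🎵"),("ogg","🎵"),
   ("zip","📦"),("rar","📦"),("7z","📦"),("tar","📦"),("gz","📦"),
   ("doc","📝"),("docx","📝"),
   ("xls","📊"),("xlsx","📊"),
   ("py","💻"),("js","💻"),("html","💻"),("css","💻"),("json","💻")] := by decide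

-- ===== VERDICT (by name: the statement is the Claim_ definition above) =====
theorem get_file_emoji_spec : Claim_equal_get_file_emoji := by
  intro name _
  unfold Spec_get_file_emoji get_file_emoji get_file_emoji_alt
  simp only [List.any_cons, List.any_nil, Bool.or_eq_true, Bool.or_false]
  rw [endswith_dot_str _ ".jpg" "jpg".toList (by decide) (by decide),
      endswith_dot_str _ ".jpeg" "jpeg".toList (by decide) (by decide),
      endswith_dot_str _ ".png" "png".toList (by decide) (by decide),
      endswith_dot_str _ ".gif" "gif".toList (by decide) (by decide),
      endswith_dot_str _ ".webp" "webp".toList (by decide) (by decide),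
      endswith_dot_str _ ".svg" "svg".toList (by decide) (by decide),
      endswith_dot_str _ ".pdf" "pdf".toList (by decide) (by decide),
      endswith_dot_str _ ".mp4" "mp4".toList (by decide) (by decide),
      endswith_dot_str _ ".mov" "mov".toList (by decide) (by decide),
      endswith_dot_str _ ".avi" "avi".toList (by decide) (by decide),
      endswith_dot_str _ ".mkv" "mkv".toList (by decide) (by decide),
      endswith_dot_str _ ".mp3" "mp3".toList (by decide) (by decide),
      endswith_dot_str _ ".wav" "wav".toList (by decide) (by decide),
      endswith_dot_str _ ".flac" "flac".toList (by decide) (by decide),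
      endswith_dot_str _ ".ogg" "ogg".toList (by decide) (by decide),
      endswith_dot_str _ ".zip" "zip".toList (by decide) (by decide),
      endswith_dot_str _ ".rar" "rar".toList (by decide) (by decide),
      endswith_dot_str _ ".7z" "7z".toList (by decide) (by decide),
      endswith_dot_str _ ".tar" "tar".toList (by decide) (by decide),
      endswith_dot_str _ ".gz" "gz".toList (by decide) (by decide),
      endswith_dot_str _ ".doc" "doc".toList (by decide) (by decide),
      endswith_dot_str _ ".docx" "docx".toList (by decide) (by decide),
      endswith_dot_str _ ".xls" "xls".toList (by decide) (by decide),
      endswith_dot_str _ ".xlsx" "xlsx".toList (by decide) (by decide),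
      endswith_dot_str _ ".py" "py".toList (by decide) (by decide),
      endswith_dot_str _ ".js" "js".toList (by decide) (by decide),
      endswith_dot_str _ ".html" "html".toList (by decide) (by decide),
      endswith_dot_str _ ".css" "css".toList (by decide) (by decide),
      endswith_dot_str _ ".json" "json".toList (by decide) (by decide)]
  cases hr : rsplitDot1 (PySem.Str.lower name).toList with
  | none => simp
  | some t =>
    simp only [Option.some.injEq, decide_eq_true_eq]
    by_cases h1 : t = ['j', 'p', 'g']; · subst h1; decide
    by_cases h2 : t = ['j', 'p', 'e', 'g']; · subst h2; decide
    by_cases h3 : t = ['p', 'n', 'g']; · subst h3; decide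
    by_cases h4 : t = ['g', 'i', 'f']; · subst h4; decide
    by_cases h5 : t = ['w', 'e', 'b', 'p']; · subst h5; decide
    by_cases h6 : t = ['s', 'v', 'g']; · subst h6; decide
    by_cases h7 : t = ['p', 'd', 'f']; · subst h7; decide
    by_cases h8 : t = ['m', 'p', '4']; · subst h8; decide
    by_cases h9 : t = ['m', 'o', 'v']; · subst h9; decide
    by_cases h10 : t = ['a', 'v', 'i']; · subst h10; decide
    by_cases h11 : t = ['m', 'k', 'v']; · subst h11; decide
    by_cases h12 : t = ['m', 'p', '3']; · subst h12; decide
    by_cases h13 : t = ['w', 'a', 'v']; · subst h13; decide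
    by_cases h14 : t = ['f', 'l', 'a', 'c']; · subst h14; decide
    by_cases h15 : t = ['o', 'g', 'g']; · subst h15; decide
    by_cases h16 : t = ['z', 'i', 'p']; · subst h16; decide
    by_cases h17 : t = ['r', 'a', 'r']; · subst h17; decide
    by_cases h18 : t = ['7', 'z']; · subst h18; decide
    by_cases h19 : t = ['t', 'a', 'r']; · subst h19; decide
    by_cases h20 : t = ['g', 'z']; · subst h20; decide
    by_cases h21 : t = ['d', 'o', 'c']; · subst h21; decide
    by_cases h22 : t = ['d', 'o', 'c', 'x']; · subst h22; decide
    by_cases h23 : t = ['x', 'l', 's']; · subst h23; decide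
    by_cases h24 : t = ['x', 'l', 's', 'x']; · subst h24; decide
    by_cases h25 : t = ['p', 'y']; · subst h25; decide
    by_cases h26 : t = ['j', 's']; · subst h26; decide
    by_cases h27 : t = ['h', 't', 'm', 'l']; · subst h27; decide
    by_cases h28 : t = ['c', 's', 's']; · subst h28; decide
    by_cases h29 : t = ['j', 's', 'o', 'n']; · subst h29; decide
    rw [emojiTable_eq, PySem.Dict.getD_eq_get?_getD]
    simp [h1,h2,h3,h4,h5,h6,h7,h8,h9,h10,h11,h12,h13,h14,h15,h16,h17,h18,h19,h20,
      h21,h22,h23,h24,h25,h26,h27,h28,h29,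
      beq_mk_false "jpg" _ _ (by decide) h1, beq_mk_false "jpeg" _ _ (by decide) h2, beq_mk_false "png" _ _ (by decide) h3, beq_mk_false "gif" _ _ (by decide) h4,
      beq_mk_false "webp" _ _ (by decide) h5, beq_mk_false "svg" _ _ (by decide) h6, beq_mk_false "pdf" _ _ (by decide) h7, beq_mk_false "mp4" _ _ (by decide) h8,
      beq_mk_false "mov" _ _ (by decide) h9, beq_mk_false "avi" _ _ (by decide) h10, beq_mk_false "mkv" _ _ (by decide) h11, beq_mk_false "mp3" _ _ (by decide) h12,
      beq_mk_false "wav" _ _ (by decide) h13, beq_mk_false "flac" _ _ (by decide) h14, beq_mk_false "ogg" _ _ (by decide) h15, beq_mk_false "zip" _ _ (by decide) h16,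
      beq_mk_false "rar" _ _ (by decide) h17, beq_mk_false "7z" _ _ (by decide) h18, beq_mk_false "tar" _ _ (by decide) h19, beq_mk_false "gz" _ _ (by decide) h20,
      beq_mk_false "doc" _ _ (by decide) h21, beq_mk_false "docx" _ _ (by decide) h22, beq_mk_false "xls" _ _ (by decide) h23, beq_mk_false "xlsx" _ _ (by decide) h24,
      beq_mk_false "py" _ _ (by decide) h25, beq_mk_false "js" _ _ (by decide) h26, beq_mk_false "html" _ _ (by decide) h27, beq_mk_false "css" _ _ (by decide) h28,
      beq_mk_false "json" _ _ (by decide) h29, PySem.Dict.get?]
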